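-- pv_equiv track=rewrite | github.com/daniel-reich/ubiquitous-fiesta | 6TJmj5gYEWBxPiuLD_23.py | seating_students
-- ===== SOURCE A (Python) =====
-- def seating_students(lst):
--     total = 0
--     y, z = lst[0], list(lst[1:])
--     for x in range(1, y + 1):
--         for i in (1, 2)[x%2 == 0:]:
--             if x not in z and x + i not in z and x + i <= y:
--                 total += 1
--     return total
-- ===== SOURCE B (Python) =====
-- def seating_students(lst):
--     # Single streaming pass: one membership test per seat, carrying the
--     # free-ness of the previous two seats instead of re-testing x+1 / x+2.
--     y = lst[0]
--     broken = set(lst[1:])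
--     total = 0
--     p1 = p2 = False  # was seat x-1 (resp. x-2) a usable in-range seat?
--     for x in range(1, y + 1):
--         free = x not in broken
--         if free and p2:
--             total += 1
--         if free and p1 and (x - 1) % 2 == 1:
--             total += 1
--         p1, p2 = free, p1
--     return total
-- ===== Notes on version B (the rewrite author's own statement) =====
-- stated objective: faster
-- what changed: A runs a nested loop testing, per seat x, membership of x, x+1 and x+2 in the broken *list*; B makes one streaming pass that tests each seat's membership once in a set and carries the free-ness of the previous two seats as state, counting each pair at its right endpoint.
import Mathlib
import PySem

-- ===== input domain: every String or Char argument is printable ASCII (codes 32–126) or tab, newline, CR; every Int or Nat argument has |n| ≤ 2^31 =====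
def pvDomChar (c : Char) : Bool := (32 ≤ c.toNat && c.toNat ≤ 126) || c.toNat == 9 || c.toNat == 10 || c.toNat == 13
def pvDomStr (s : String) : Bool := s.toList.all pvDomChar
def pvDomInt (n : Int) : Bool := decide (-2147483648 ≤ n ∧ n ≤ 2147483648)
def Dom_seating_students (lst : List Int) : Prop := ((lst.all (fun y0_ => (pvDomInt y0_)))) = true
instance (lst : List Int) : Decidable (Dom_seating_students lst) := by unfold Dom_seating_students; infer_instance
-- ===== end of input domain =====

-- B replaces A's nested loop (up to three membership tests per seat) by a single streaming
-- pass carrying the free-ness of the previous two seats (one set lookup per seat); objective: faster.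

-- ===== PORT A =====
def seating_students (lst : List Int) : Int :=
  match PySem.List.pyGet? lst 0 with
  | none => 0   -- lst[0] raises IndexError on []: excluded by Pre_
  | some y =>
    let z : List Int := PySem.List.slice lst (some 1) none
    (PySem.List.pyRange 1 (y + 1) 1).foldl (fun total x =>
      (if PySem.Int.mod x 2 = 0 then [(2 : Int)] else [1, 2]).foldl (fun total i =>
        if x ∉ z ∧ x + i ∉ z ∧ x + i ≤ y then total + 1 else total) total) 0

-- ===== PORT B =====
def seating_students_alt (lst : List Int) : Int :=
  match PySem.List.pyGet? lst 0 with
  | none => 0   -- lst[0] raises IndexError on []: excluded by Pre_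
  | some y =>
    let broken : PySem.Set Int := PySem.Set.ofList (PySem.List.slice lst (some 1) none)
    let st := (PySem.List.pyRange 1 (y + 1) 1).foldl
      (fun (st : Int × Bool × Bool) x =>
        let free := !(PySem.Set.contains broken x)
        let t1 := if free && st.2.2 then st.1 + 1 else st.1
        let t2 := if free && st.2.1 && decide (PySem.Int.mod (x - 1) 2 = 1) then t1 + 1 else t1
        (t2, free, st.2.1)) ((0 : Int), false, false)
    st.1

-- ===== PRECONDITION & SPEC =====
-- Pre_ excludes only the empty list, on which A's 'lst[0]' raises IndexError.
def Pre_seating_students (lst : List Int) : Prop := lst ≠ []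
instance (lst : List Int) : Decidable (Pre_seating_students lst) := by unfold Pre_seating_students; infer_instance
def pvWitness_seating_students : List Int := [5, 2]
def Spec_seating_students (lst : List Int) (out : Int) : Prop := out = seating_students_alt lst
instance (lst : List Int) (out : Int) : Decidable (Spec_seating_students lst out) := by unfold Spec_seating_students; infer_instance

-- ===== CLAIM (what is proved, stated in full; the proofs are below) =====
def Claim_equal_seating_students : Prop := ∀ (lst : List Int), Dom_seating_students lst → Pre_seating_students lst → Spec_seating_students lst (seating_students lst)

-- ===== LEMMAS AND PROOFS =====

-- gap pair (u, u+2): both seats free and inside [1, y]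
def pvG (z : List Int) (y u : Int) : Int :=
  if 1 ≤ u ∧ u ∉ z ∧ u + 2 ∉ z ∧ u + 2 ≤ y then 1 else 0
-- adjacent pair (u, u+1) at odd u: both seats free and inside [1, y]
def pvH (z : List Int) (y u : Int) : Int :=
  if 1 ≤ u ∧ PySem.Int.mod u 2 = 1 ∧ u ∉ z ∧ u + 1 ∉ z ∧ u + 1 ≤ y then 1 else 0
-- B's carried flag: seat u exists (u ≥ 1) and is not broken
def pvFr (z : List Int) (u : Int) : Bool := !decide (u ∈ z) && decide (1 ≤ u)

theorem pv_inner_A (z : List Int) (y x t : Int) (hx : 1 ≤ x) :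
    (if PySem.Int.mod x 2 = 0 then [(2 : Int)] else [1, 2]).foldl (fun total i =>
        if x ∉ z ∧ x + i ∉ z ∧ x + i ≤ y then total + 1 else total) t
      = t + (pvH z y x + pvG z y x) := by
  have hm : PySem.Int.mod x 2 = x % 2 := PySem.Int.mod_eq_emod_of_pos (by omega)
  simp only [pvH, pvG, hm]
  rcases Int.emod_two_eq x with h | h <;>
    [rw [if_pos h]; rw [if_neg (by omega)]] <;>
    simp only [List.foldl] <;>
    split_ifs <;> first | omega | tauto

theorem pv_A_sum (z : List Int) (y : Int) : ∀ (n : Nat) (a t : Int), 1 ≤ a → (y + 1 - a).toNat = n →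
    (PySem.List.pyRange a (y + 1) 1).foldl (fun total x =>
      (if PySem.Int.mod x 2 = 0 then [(2 : Int)] else [1, 2]).foldl (fun total i =>
        if x ∉ z ∧ x + i ∉ z ∧ x + i ≤ y then total + 1 else total) total) t
    = t + ((PySem.List.pyRange a (y + 1) 1).map (fun x => pvH z y x + pvG z y x)).sum := by
  intro n
  induction n with
  | zero =>
    intro a t ha hn
    rw [PySem.List.pyRange_one_eq_nil (by omega)]
    simp
  | succ m ih =>
    intro a t ha hn
    rw [PySem.List.pyRange_one_cons (by omega)]
    simp only [List.foldl_cons, List.map_cons, List.sum_cons]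
    rw [pv_inner_A z y a t ha, ih (a + 1) _ (by omega) (by omega)]
    ring

theorem pv_B_step (z : List Int) (y a t : Int) (_h1 : 1 ≤ a) (h2 : a ≤ y) :
    (if !decide (a ∈ z) && pvFr z (a - 1) && decide (PySem.Int.mod (a - 1) 2 = 1) then
      (if !decide (a ∈ z) && pvFr z (a - 2) then t + 1 else t) + 1
     else (if !decide (a ∈ z) && pvFr z (a - 2) then t + 1 else t))
    = t + pvG z y (a - 2) + pvH z y (a - 1) := by
  simp only [pvFr, pvG, pvH, Bool.and_eq_true, Bool.not_eq_true', decide_eq_true_eq,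
    decide_eq_false_iff_not, show a - 2 + 2 = a from by omega, show a - 1 + 1 = a from by omega]
  split_ifs <;> first | omega | tauto

theorem pv_loop (z : List Int) (y : Int) : ∀ (n : Nat) (a t : Int), 1 ≤ a → (y + 1 - a).toNat = n →
    ((PySem.List.pyRange a (y + 1) 1).foldl
      (fun (st : Int × Bool × Bool) x =>
        (if !decide (x ∈ z) && st.2.1 && decide (PySem.Int.mod (x - 1) 2 = 1) then
          (if !decide (x ∈ z) && st.2.2 then st.1 + 1 else st.1) + 1
         else (if !decide (x ∈ z) && st.2.2 then st.1 + 1 else st.1),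
         !decide (x ∈ z), st.2.1)) (t, pvFr z (a - 1), pvFr z (a - 2))).1
    = t + ((PySem.List.pyRange a (y + 1) 1).map (fun x => pvH z y x + pvG z y x)).sum
        + pvG z y (a - 2) + pvG z y (a - 1) + pvH z y (a - 1) := by
  intro n
  induction n with
  | zero =>
    intro a t ha hn
    rw [PySem.List.pyRange_one_eq_nil (by omega)]
    have g2 : pvG z y (a - 2) = 0 := by
      simp only [pvG]; rw [if_neg]; rintro ⟨_, _, _, h4⟩; omega
    have g1 : pvG z y (a - 1) = 0 := by
      simp only [pvG]; rw [if_neg]; rintro ⟨_, _, _, h4⟩; omega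
    have h1 : pvH z y (a - 1) = 0 := by
      simp only [pvH]; rw [if_neg]; rintro ⟨_, _, _, _, h5⟩; omega
    simp [g2, g1, h1]
  | succ m ih =>
    intro a t ha hn
    have hay : a ≤ y := by omega
    rw [PySem.List.pyRange_one_cons (by omega)]
    simp only [List.foldl_cons, List.map_cons, List.sum_cons]
    have hfree : (!decide (a ∈ z)) = pvFr z a := by
      simp [pvFr, ha]
    rw [pv_B_step z y a t ha hay, hfree]
    have := ih (a + 1) (t + pvG z y (a - 2) + pvH z y (a - 1)) (by omega) (by omega)
    rw [show a + 1 - 1 = a from by omega, show a + 1 - 2 = a - 1 from by omega] at this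
    rw [this]
    ring

-- ===== VERDICT (by name: the statement is the Claim_ definition above) =====
theorem seating_students_spec : Claim_equal_seating_students := by
  intro lst _ hpre
  unfold Spec_seating_students
  cases lst with
  | nil => exact absurd rfl hpre
  | cons y zs =>
    have e1 : PySem.List.pyGet? (y :: zs) 0 = some y := by
      simp [PySem.List.pyGet?, PySem.List.pyIdx?]
    simp only [seating_students, seating_students_alt, e1, PySem.List.slice_from_one,
      List.tail_cons]
    have hfun : (fun (st : Int × Bool × Bool) x =>
        ((if !(PySem.Set.contains (PySem.Set.ofList zs) x) && st.2.1 && decide (PySem.Int.mod (x - 1) 2 = 1) then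
          (if !(PySem.Set.contains (PySem.Set.ofList zs) x) && st.2.2 then st.1 + 1 else st.1) + 1
         else (if !(PySem.Set.contains (PySem.Set.ofList zs) x) && st.2.2 then st.1 + 1 else st.1)),
         !(PySem.Set.contains (PySem.Set.ofList zs) x), st.2.1))
        = (fun (st : Int × Bool × Bool) x =>
        ((if !decide (x ∈ zs) && st.2.1 && decide (PySem.Int.mod (x - 1) 2 = 1) then
          (if !decide (x ∈ zs) && st.2.2 then st.1 + 1 else st.1) + 1
         else (if !decide (x ∈ zs) && st.2.2 then st.1 + 1 else st.1)),
         !decide (x ∈ zs), st.2.1)) := by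
      funext st x
      have hc : PySem.Set.contains (PySem.Set.ofList zs) x = decide (x ∈ zs) := by
        simp [PySem.Set.contains_eq_listContains]
      rw [hc]
    rw [hfun]
    have hinit : ((0 : Int), false, false) = ((0 : Int), pvFr zs (1 - 1), pvFr zs (1 - 2)) := by
      simp [pvFr]
    rw [hinit, pv_loop zs y (y + 1 - 1).toNat 1 0 (by omega) rfl,
      pv_A_sum zs y (y + 1 - 1).toNat 1 0 (by omega) rfl]
    have g2 : pvG zs y (1 - 2) = 0 := by
      simp only [pvG]; rw [if_neg]; rintro ⟨hh, _⟩; omega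
    have g1 : pvG zs y (1 - 1) = 0 := by
      simp only [pvG]; rw [if_neg]; rintro ⟨hh, _⟩; omega
    have hH : pvH zs y (1 - 1) = 0 := by
      simp only [pvH]; rw [if_neg]; rintro ⟨hh, _⟩; omega
    rw [g2, g1, hH]
    ring
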